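-- pv_equiv track=rewrite | github.com/Ablaszak/ASD | Dynamic/Notes/Cars_on_ferry.py | ferry
-- ===== SOURCE A (Python) =====
-- def ferry(A, L, i, j, k, f):
--
--     if(k == 0):
--         return True
--
--     if((i, j, k) in f): # Już rozpatrywaliśmy?
--         return f[(i, j, k)]
--
--     f[(i, j, k)] = False
--
--     if(i-A[k] >= 0): # Można zmieścić na górny pokład
--         f[(i, j, k)] |= ferry(A, L, i-A[k], j, k-1, f)
--     if(j-A[k] >=0): # Można zmieścić na dolny pokład
--         f[(i, j, k)] |= ferry(A, L,i, j-A[k], k-1, f)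
--
--     return f[(i, j, k)]
-- ===== SOURCE B (Python) =====
-- def ferry(A, L, i, j, k, f):
--     # Iterative subset-sum DP: since i+j minus the placed weight is invariant, the lower-deck
--     # capacity is determined by the upper one, so one set of reachable upper capacities suffices.
--     if k == 0:
--         return True
--     total = i + j
--     S = {i}
--     for t in range(k, 0, -1):
--         w = A[t]
--         total -= w
--         T = set()
--         for v in S:
--             if v - w >= 0:
--                 T.add(v - w)
--             if total - v >= 0:
--                 T.add(v)
--         S = T
--     return len(S) > 0
-- ===== Notes on version B (the rewrite author's own statement) =====
-- stated objective: alternative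
-- what changed: Replaced the memoized top-down recursion over (i,j,k) states (threaded through a mutable dict) by an iterative forward subset-sum DP that keeps one set of reachable upper-deck capacities per car, exploiting that the lower-deck capacity is determined by the upper one since i+j minus the placed weight is invariant.
-- outside the precondition, e.g. on ferry([0, 1], 5, 0, 0, 1, {(0, 0, 1): True}): A returns True, B returns False
import Mathlib
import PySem

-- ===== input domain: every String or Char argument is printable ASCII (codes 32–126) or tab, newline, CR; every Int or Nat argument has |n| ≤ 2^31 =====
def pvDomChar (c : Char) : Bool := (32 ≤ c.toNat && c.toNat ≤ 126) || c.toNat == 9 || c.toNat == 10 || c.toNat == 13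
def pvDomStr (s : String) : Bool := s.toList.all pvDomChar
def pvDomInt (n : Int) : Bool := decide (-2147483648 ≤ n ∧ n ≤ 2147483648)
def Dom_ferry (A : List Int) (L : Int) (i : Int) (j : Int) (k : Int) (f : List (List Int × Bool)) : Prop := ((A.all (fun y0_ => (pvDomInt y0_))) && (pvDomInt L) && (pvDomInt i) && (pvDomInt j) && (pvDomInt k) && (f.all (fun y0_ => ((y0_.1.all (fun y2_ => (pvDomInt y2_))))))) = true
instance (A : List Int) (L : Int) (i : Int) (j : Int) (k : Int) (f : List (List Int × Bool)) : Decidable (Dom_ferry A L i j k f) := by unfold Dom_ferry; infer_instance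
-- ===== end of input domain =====

-- B replaces A's memoized recursion by an iterative set-based subset-sum DP; A mutates the
-- memo dict f in place, B does not — the equivalence proved here is about the RETURN value only.

-- ===== PORT A =====
-- fuel = recursion depth bound; k decreases by 1 each level, so k.toNat + 1 fuel is exact
-- on Pre_ inputs (outside Pre_ the Python recurses without bound or raises).
def ferryAux (Aa : List Int) (L : Int) : Nat → Int → Int → Int → PySem.Dict (List Int) Bool → Bool × PySem.Dict (List Int) Bool
  | 0, _, _, _, f => (false, f)
  | fuel+1, i, j, k, f =>
    if k = 0 then (true, f)
    else
      match PySem.Dict.get? f [i, j, k] with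
      | some v => (v, f)
      | none =>
        let f0 := PySem.Dict.insert f [i, j, k] false
        let w := (PySem.List.pyGet? Aa k).getD 0
        let f1 := if i - w ≥ 0 then
                    let r := ferryAux Aa L fuel (i - w) j (k-1) f0
                    PySem.Dict.insert r.2 [i, j, k] ((PySem.Dict.getD r.2 [i, j, k] false) || r.1)
                  else f0
        let f2 := if j - w ≥ 0 then
                    let r := ferryAux Aa L fuel i (j - w) (k-1) f1
                    PySem.Dict.insert r.2 [i, j, k] ((PySem.Dict.getD r.2 [i, j, k] false) || r.1)
                  else f1
        (PySem.Dict.getD f2 [i, j, k] false, f2)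

def ferry (A : List Int) (L : Int) (i : Int) (j : Int) (k : Int) (f : List (List Int × Bool)) : Bool :=
  (ferryAux A L (k.toNat + 1) i j k (PySem.Dict.mk f)).1

-- ===== PORT B =====
-- one step of Source B's loop body: w = A[t]; total -= w; S = {filtered moves}
def altStep (Aa : List Int) (st : Int × PySem.Set Int) (t : Int) : Int × PySem.Set Int :=
  let w := (PySem.List.pyGet? Aa t).getD 0
  let total := st.1 - w
  let T := st.2.foldl (fun T v =>
      let T' := if v - w ≥ 0 then PySem.Set.add T (v - w) else T
      if total - v ≥ 0 then PySem.Set.add T' v else T') (PySem.Set.ofList [])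
  (total, T)

def ferry_alt (A : List Int) (L : Int) (i : Int) (j : Int) (k : Int) (f : List (List Int × Bool)) : Bool :=
  if k = 0 then true
  else
    let res := (PySem.List.pyRange k 0 (-1)).foldl (altStep A) (i + j, PySem.Set.ofList [i])
    decide (0 < PySem.Set.len res.2)

-- ===== PRECONDITION & SPEC =====
-- true iff a memo entry with this key can never be consulted by the recursion started at k
def pvKeyUnreachable (k : Int) (key : List Int) : Bool :=
  match key with
  | [_, _, k'] => decide (k' < 1 ∨ k < k')
  | _ => true

-- Pre_ excludes: k < 0 (A recurses without bound), 1 ≤ k with k ≥ len(A) (IndexError), and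
-- memo dicts pre-seeded with an entry whose key (i',j',k') has 1 ≤ k' ≤ k — on such inputs
-- A's return value is an artefact of the cache contents rather than of the packing instance.
def Pre_ferry (A : List Int) (L : Int) (i : Int) (j : Int) (k : Int) (f : List (List Int × Bool)) : Prop :=
  0 ≤ k ∧ (k = 0 ∨ k < (A.length : Int)) ∧ ∀ p ∈ f, pvKeyUnreachable k p.1 = true
instance (A : List Int) (L : Int) (i : Int) (j : Int) (k : Int) (f : List (List Int × Bool)) : Decidable (Pre_ferry A L i j k f) := by unfold Pre_ferry; infer_instance

def pvWitness_ferry : List Int × Int × Int × Int × Int × (List (List Int × Bool)) := ([2, 1], 0, 1, 0, 1, [])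

def Spec_ferry (A : List Int) (L : Int) (i : Int) (j : Int) (k : Int) (f : List (List Int × Bool)) (out : Bool) : Prop := out = ferry_alt A L i j k f
instance (A : List Int) (L : Int) (i : Int) (j : Int) (k : Int) (f : List (List Int × Bool)) (out : Bool) : Decidable (Spec_ferry A L i j k f out) := by unfold Spec_ferry; infer_instance

-- ===== CLAIM (what is proved, stated in full; the proofs are below) =====
def Claim_equal_ferry : Prop := ∀ (A : List Int) (L : Int) (i : Int) (j : Int) (k : Int) (f : List (List Int × Bool)), Dom_ferry A L i j k f → Pre_ferry A L i j k f → Spec_ferry A L i j k f (ferry A L i j k f)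

-- ===== LEMMAS AND PROOFS =====

def feasN (Aa : List Int) : Int → Int → Nat → Bool
  | _, _, 0 => true
  | i, j, n+1 =>
    let w := (PySem.List.pyGet? Aa ((n : Int) + 1)).getD 0
    (decide (i - w ≥ 0) && feasN Aa (i - w) j n) || (decide (j - w ≥ 0) && feasN Aa i (j - w) n)

def MemoOK (Aa : List Int) (k : Int) (d : PySem.Dict (List Int) Bool) : Prop :=
  ∀ i' j' k' v, PySem.Dict.get? d [i', j', k'] = some v → 1 ≤ k' → k' ≤ k → v = feasN Aa i' j' k'.toNat

theorem ferryAux_none (Aa : List Int) (L : Int) (fuel : Nat) (i j k : Int)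
    (f : PySem.Dict (List Int) Bool) (hk : ¬ k = 0) (hget : PySem.Dict.get? f [i, j, k] = none) :
    ferryAux Aa L (fuel+1) i j k f =
      (let f0 := PySem.Dict.insert f [i, j, k] false
       let w := (PySem.List.pyGet? Aa k).getD 0
       let f1 := if i - w ≥ 0 then
                   let r := ferryAux Aa L fuel (i - w) j (k-1) f0
                   PySem.Dict.insert r.2 [i, j, k] ((PySem.Dict.getD r.2 [i, j, k] false) || r.1)
                 else f0
       let f2 := if j - w ≥ 0 then
                   let r := ferryAux Aa L fuel i (j - w) (k-1) f1
                   PySem.Dict.insert r.2 [i, j, k] ((PySem.Dict.getD r.2 [i, j, k] false) || r.1)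
                 else f1
       (PySem.Dict.getD f2 [i, j, k] false, f2)) := by
  simp only [ferryAux, if_neg hk, hget]

theorem ferryAux_some (Aa : List Int) (L : Int) (fuel : Nat) (i j k : Int) (v : Bool)
    (f : PySem.Dict (List Int) Bool) (hk : ¬ k = 0) (hget : PySem.Dict.get? f [i, j, k] = some v) :
    ferryAux Aa L (fuel+1) i j k f = (v, f) := by
  simp only [ferryAux, if_neg hk, hget]

theorem key_inj (i j k i' j' k' : Int) (h : ([i', j', k'] : List Int) = [i, j, k]) :
    i' = i ∧ j' = j ∧ k' = k := by simpa using h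


theorem ferry_second_half (Aa : List Int) (L : Int) (fuel : Nat) (i j k w : Int)
    (f f1 f2 : PySem.Dict (List Int) Bool) (v1 : Bool)
    (hk1 : 1 ≤ k)
    (hw : w = (PySem.List.pyGet? Aa k).getD 0)
    (hinv : MemoOK Aa k f)
    (hrec : ∀ (i'' j'' : Int) (d : PySem.Dict (List Int) Bool), MemoOK Aa (k-1) d →
        (ferryAux Aa L fuel i'' j'' (k-1) d).1 = feasN Aa i'' j'' (k-1).toNat
        ∧ MemoOK Aa (k-1) (ferryAux Aa L fuel i'' j'' (k-1) d).2
        ∧ (∀ key : List Int, (∀ i' j' k', key = [i', j', k'] → k - 1 < k') →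
            PySem.Dict.get? (ferryAux Aa L fuel i'' j'' (k-1) d).2 key = PySem.Dict.get? d key))
    (hf1key : PySem.Dict.get? f1 [i, j, k] = some v1)
    (hf1mok : MemoOK Aa (k-1) f1)
    (hf1pres : ∀ key' : List Int, key' ≠ [i, j, k] →
        (∀ i' j' k', key' = [i', j', k'] → k ≤ k') →
        PySem.Dict.get? f1 key' = PySem.Dict.get? f key')
    (hv1 : v1 = (decide (i - w ≥ 0) && feasN Aa (i - w) j (k-1).toNat))
    (hf2 : f2 = if j - w ≥ 0 then
        (fun r => PySem.Dict.insert r.2 [i, j, k] ((PySem.Dict.getD r.2 [i, j, k] false) || r.1))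
          (ferryAux Aa L fuel i (j - w) (k-1) f1)
      else f1) :
    PySem.Dict.getD f2 [i, j, k] false = feasN Aa i j k.toNat
    ∧ MemoOK Aa k f2
    ∧ (∀ key : List Int, (∀ i' j' k', key = [i', j', k'] → k < k') →
        PySem.Dict.get? f2 key = PySem.Dict.get? f key) := by
  have hfe : feasN Aa i j k.toNat
      = ((decide (i - w ≥ 0) && feasN Aa (i - w) j (k-1).toNat)
         || (decide (j - w ≥ 0) && feasN Aa i (j - w) (k-1).toNat)) := by
    have hm : k.toNat = (k-1).toNat + 1 := by omega
    have hc : (((k-1).toNat : Nat) : Int) + 1 = k := by omega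
    rw [hm]; simp only [feasN]; rw [hc, ← hw]
  -- facts about f2, uniformly over the branch
  have hstep : PySem.Dict.get? f2 [i, j, k]
        = some (v1 || (decide (j - w ≥ 0) && feasN Aa i (j - w) (k-1).toNat))
      ∧ MemoOK Aa (k-1) f2
      ∧ (∀ key' : List Int, key' ≠ [i, j, k] →
          (∀ i' j' k', key' = [i', j', k'] → k ≤ k') →
          PySem.Dict.get? f2 key' = PySem.Dict.get? f key') := by
    by_cases hc2 : j - w ≥ 0
    · rw [hf2, if_pos hc2]
      obtain ⟨hrv, hrmok, hrpres⟩ := hrec i (j - w) f1 hf1mok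
      have hrkey : PySem.Dict.get? (ferryAux Aa L fuel i (j - w) (k-1) f1).2 [i, j, k] = some v1 := by
        rw [hrpres [i, j, k] (fun i' j' k' he => by
          obtain ⟨-, -, hke⟩ := key_inj i j k i' j' k' he.symm; omega)]
        exact hf1key
      refine ⟨?_, ?_, ?_⟩
      · rw [PySem.Dict.get?_insert_self, PySem.Dict.getD_eq_get?_getD, hrkey]
        have hcw : w ≤ j := by omega
        simp [hrv, hcw]
      · intro i' j' k' v hg h1 h2
        have hne : ([i', j', k'] : List Int) ≠ [i, j, k] := by
          intro he; obtain ⟨-, -, hke⟩ := key_inj i j k i' j' k' he; omega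
        rw [PySem.Dict.get?_insert_of_ne _ _ hne] at hg
        exact hrmok i' j' k' v hg h1 h2
      · intro key' hne hcomp
        rw [PySem.Dict.get?_insert_of_ne _ _ hne,
            hrpres key' (fun i' j' k' he => by have := hcomp i' j' k' he; omega)]
        exact hf1pres key' hne hcomp
    · rw [hf2, if_neg hc2]
      refine ⟨?_, hf1mok, hf1pres⟩
      rw [hf1key]
      have hcw : ¬ w ≤ j := by omega
      simp [hcw]
  obtain ⟨hf2key, hf2mok, hf2pres⟩ := hstep
  refine ⟨?_, ?_, ?_⟩
  · rw [PySem.Dict.getD_eq_get?_getD, hf2key, hfe, hv1]; rfl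
  · intro i' j' k' v hg h1 h2
    by_cases hne : ([i', j', k'] : List Int) = [i, j, k]
    · have hk3 := key_inj i j k i' j' k' hne
      rw [hne, hf2key] at hg
      have hv : v = (v1 || (decide (j - w ≥ 0) && feasN Aa i (j - w) (k-1).toNat)) :=
        (Option.some.inj hg).symm
      rw [hk3.1, hk3.2.1, hk3.2.2, hv, hv1, ← hfe]
    · by_cases hk2 : k' ≤ k - 1
      · exact hf2mok i' j' k' v hg h1 hk2
      · have hkk : k' = k := by omega
        rw [hf2pres [i', j', k'] hne (fun a b c he => by
          obtain ⟨-, -, rfl⟩ := key_inj i' j' k' a b c he.symm; omega)] at hg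
        exact hinv i' j' k' v hg h1 h2
  · intro key' hcomp
    have hne : key' ≠ [i, j, k] := by
      intro he; have := hcomp i j k he; omega
    exact hf2pres key' hne (fun a b c he => by have := hcomp a b c he; omega)

theorem ferryAux_correct (Aa : List Int) (L : Int) : ∀ (fuel : Nat) (i j k : Int) (f : PySem.Dict (List Int) Bool),
    0 ≤ k → (k = 0 ∨ k < (Aa.length : Int)) → k.toNat < fuel → MemoOK Aa k f →
    (ferryAux Aa L fuel i j k f).1 = feasN Aa i j k.toNat
    ∧ MemoOK Aa k (ferryAux Aa L fuel i j k f).2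
    ∧ (∀ key : List Int, (∀ i' j' k', key = [i', j', k'] → k < k') →
        PySem.Dict.get? (ferryAux Aa L fuel i j k f).2 key = PySem.Dict.get? f key) := by
  intro fuel
  induction fuel with
  | zero => intro i j k f _ _ hfuel _; exact absurd hfuel (Nat.not_lt_zero _)
  | succ fuel ih =>
    intro i j k f hk0 hkl hfuel hinv
    by_cases hk : k = 0
    · subst hk
      simp only [ferryAux, if_pos rfl]
      exact ⟨by simp [feasN], hinv, fun _ _ => rfl⟩
    · have hk1 : 1 ≤ k := by omega
      have hklen : k < (Aa.length : Int) := by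
        rcases hkl with h | h
        · exact absurd h hk
        · exact h
      cases hget : PySem.Dict.get? f [i, j, k] with
      | some v =>
        rw [ferryAux_some Aa L fuel i j k v f hk hget]
        exact ⟨hinv i j k v hget hk1 le_rfl, hinv, fun _ _ => rfl⟩
      | none =>
        rw [ferryAux_none Aa L fuel i j k f hk hget]
        dsimp only
        set w := (PySem.List.pyGet? Aa k).getD 0 with hw
        set f0 := PySem.Dict.insert f [i, j, k] false with hf0
        -- facts about f0
        have hf0key : PySem.Dict.get? f0 [i, j, k] = some false := by
          rw [hf0]; exact PySem.Dict.get?_insert_self _ _ _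
        have hf0ne : ∀ key' : List Int, key' ≠ [i, j, k] →
            PySem.Dict.get? f0 key' = PySem.Dict.get? f key' := by
          intro key' hne; rw [hf0]; exact PySem.Dict.get?_insert_of_ne _ _ hne
        have hmok0 : MemoOK Aa (k-1) f0 := by
          intro i' j' k' v hg h1 h2
          have hne : ([i', j', k'] : List Int) ≠ [i, j, k] := by
            intro he; obtain ⟨-, -, hke⟩ := key_inj i j k i' j' k' he; omega
          rw [hf0ne _ hne] at hg
          exact hinv i' j' k' v hg h1 (by omega)
        -- branch 1
        have hrec : ∀ (i'' j'' : Int) (d : PySem.Dict (List Int) Bool), MemoOK Aa (k-1) d →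
            (ferryAux Aa L fuel i'' j'' (k-1) d).1 = feasN Aa i'' j'' (k-1).toNat
            ∧ MemoOK Aa (k-1) (ferryAux Aa L fuel i'' j'' (k-1) d).2
            ∧ (∀ key : List Int, (∀ i' j' k', key = [i', j', k'] → k - 1 < k') →
                PySem.Dict.get? (ferryAux Aa L fuel i'' j'' (k-1) d).2 key = PySem.Dict.get? d key) := by
          intro i'' j'' d hd
          exact ih i'' j'' (k-1) d (by omega) (by right; omega) (by omega) hd
        by_cases hc1 : i - w ≥ 0
        · rw [if_pos hc1]
          obtain ⟨hrv, hrmok, hrpres⟩ := hrec (i - w) j f0 hmok0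
          have hrkey : PySem.Dict.get? (ferryAux Aa L fuel (i - w) j (k-1) f0).2 [i, j, k] = some false := by
            rw [hrpres [i, j, k] (fun a b c he => by
              obtain ⟨-, -, hkc⟩ := key_inj a b c i j k he; omega)]
            exact hf0key
          have hv1 : (PySem.Dict.getD (ferryAux Aa L fuel (i - w) j (k-1) f0).2 [i, j, k] false
              || (ferryAux Aa L fuel (i - w) j (k-1) f0).1)
              = (decide (i - w ≥ 0) && feasN Aa (i - w) j (k-1).toNat) := by
            rw [PySem.Dict.getD_eq_get?_getD, hrkey]
            have hcw : w ≤ i := by omega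
            simp [hrv, hcw]
          have hf1key : PySem.Dict.get? (PySem.Dict.insert (ferryAux Aa L fuel (i - w) j (k-1) f0).2 [i, j, k]
              (PySem.Dict.getD (ferryAux Aa L fuel (i - w) j (k-1) f0).2 [i, j, k] false
               || (ferryAux Aa L fuel (i - w) j (k-1) f0).1)) [i, j, k]
              = some (PySem.Dict.getD (ferryAux Aa L fuel (i - w) j (k-1) f0).2 [i, j, k] false
               || (ferryAux Aa L fuel (i - w) j (k-1) f0).1) :=
            PySem.Dict.get?_insert_self _ _ _
          have hf1mok : MemoOK Aa (k-1) (PySem.Dict.insert (ferryAux Aa L fuel (i - w) j (k-1) f0).2 [i, j, k]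
              (PySem.Dict.getD (ferryAux Aa L fuel (i - w) j (k-1) f0).2 [i, j, k] false
               || (ferryAux Aa L fuel (i - w) j (k-1) f0).1)) := by
            intro i' j' k' v hg h1 h2
            have hne : ([i', j', k'] : List Int) ≠ [i, j, k] := by
              intro he; obtain ⟨-, -, hke⟩ := key_inj i j k i' j' k' he; omega
            rw [PySem.Dict.get?_insert_of_ne _ _ hne] at hg
            exact hrmok i' j' k' v hg h1 h2
          have hf1pres : ∀ key' : List Int, key' ≠ [i, j, k] →
              (∀ a b c, key' = [a, b, c] → k ≤ c) →
              PySem.Dict.get? (PySem.Dict.insert (ferryAux Aa L fuel (i - w) j (k-1) f0).2 [i, j, k]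
                (PySem.Dict.getD (ferryAux Aa L fuel (i - w) j (k-1) f0).2 [i, j, k] false
                 || (ferryAux Aa L fuel (i - w) j (k-1) f0).1)) key' = PySem.Dict.get? f key' := by
            intro key' hne hcomp
            rw [PySem.Dict.get?_insert_of_ne _ _ hne,
                hrpres key' (fun a b c he => by have := hcomp a b c he; omega),
                hf0ne key' hne]
          obtain ⟨c1, c2, c3⟩ := ferry_second_half Aa L fuel i j k w f _ _ _ hk1 hw hinv hrec
            hf1key hf1mok hf1pres hv1 rfl
          exact ⟨c1, c2, c3⟩
        · rw [if_neg hc1]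
          have hv1 : false = (decide (i - w ≥ 0) && feasN Aa (i - w) j (k-1).toNat) := by
            have hcw : ¬ w ≤ i := by omega
            simp [hcw]
          obtain ⟨c1, c2, c3⟩ := ferry_second_half Aa L fuel i j k w f f0 _ false hk1 hw hinv hrec
            hf0key hmok0 (fun key' hne _ => hf0ne key' hne) hv1 rfl
          exact ⟨c1, c2, c3⟩



theorem mem_innerfold (w total : Int) : ∀ (S acc : List Int) (x : Int),
    x ∈ S.foldl (fun T v =>
      let T' := if v - w ≥ 0 then PySem.Set.add T (v - w) else T
      if total - v ≥ 0 then PySem.Set.add T' v else T') acc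
    ↔ x ∈ acc ∨ ∃ v ∈ S, (w ≤ v ∧ x = v - w) ∨ (v ≤ total ∧ x = v) := by
  intro S
  induction S with
  | nil => simp
  | cons a S ih =>
    intro acc x
    simp only [List.foldl_cons, ih, List.mem_cons]
    have hmem : ∀ (T : List Int),
        x ∈ (let T' := if a - w ≥ 0 then PySem.Set.add T (a - w) else T
             if total - a ≥ 0 then PySem.Set.add T' a else T')
        ↔ x ∈ T ∨ (w ≤ a ∧ x = a - w) ∨ (a ≤ total ∧ x = a) := by
      intro T
      split_ifs with h1 h2 h2 <;>
        simp only [ge_iff_le, sub_nonneg] at h1 h2 <;>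
        simp [PySem.Set.mem_add] <;> tauto
    rw [hmem]
    constructor
    · rintro ((h | hc) | ⟨v, hv, hc⟩)
      · exact Or.inl h
      · exact Or.inr ⟨a, Or.inl rfl, hc⟩
      · exact Or.inr ⟨v, Or.inr hv, hc⟩
    · rintro (h | ⟨v, (rfl | hv), hc⟩)
      · exact Or.inl (Or.inl h)
      · exact Or.inl (Or.inr hc)
      · exact Or.inr ⟨v, hv, hc⟩

theorem foldl_range_feas (Aa : List Int) : ∀ (n : Nat) (tot : Int) (S : List Int),
    ((PySem.List.pyRange (n : Int) 0 (-1)).foldl (altStep Aa) (tot, S)).2 ≠ []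
    ↔ ∃ v ∈ S, feasN Aa v (tot - v) n = true := by
  intro n
  induction n with
  | zero =>
    intro tot S
    rw [show ((0:Nat):Int) = 0 from rfl, PySem.List.pyRange_neg_one_eq_nil le_rfl]
    simp only [List.foldl_nil, feasN]
    constructor
    · intro h
      rcases List.exists_mem_of_ne_nil S h with ⟨v, hv⟩
      exact ⟨v, hv, by simp [feasN]⟩
    · rintro ⟨v, hv, -⟩ hnil
      simp [hnil] at hv
  | succ n ih =>
    intro tot S
    have h1 : ((n+1 : Nat) : Int) = (n:Int)+1 := by push_cast; ring
    rw [h1, PySem.List.pyRange_neg_one_cons (by positivity)]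
    have h2 : ((n:Int)+1) - 1 = (n:Int) := by ring
    rw [h2, List.foldl_cons]
    have hstep : altStep Aa (tot, S) ((n:Int)+1)
        = (tot - (PySem.List.pyGet? Aa ((n:Int)+1)).getD 0,
           S.foldl (fun T v =>
             let T' := if v - (PySem.List.pyGet? Aa ((n:Int)+1)).getD 0 ≥ 0
                       then PySem.Set.add T (v - (PySem.List.pyGet? Aa ((n:Int)+1)).getD 0) else T
             if (tot - (PySem.List.pyGet? Aa ((n:Int)+1)).getD 0) - v ≥ 0
             then PySem.Set.add T' v else T') (PySem.Set.ofList [])) := rfl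
    rw [hstep]
    set w := (PySem.List.pyGet? Aa ((n:Int)+1)).getD 0 with hw
    rw [ih]
    constructor
    · rintro ⟨x, hx, hfeas⟩
      rw [mem_innerfold] at hx
      rcases hx with hx | ⟨v, hv, hc⟩
      · simp [PySem.Set.ofList] at hx
      · refine ⟨v, hv, ?_⟩
        simp only [feasN, ← hw, Bool.or_eq_true, Bool.and_eq_true, decide_eq_true_eq]
        rcases hc with ⟨hle, hcx⟩ | ⟨hle, hcx⟩
        · rw [hcx, show tot - w - (v - w) = tot - v by ring] at hfeas
          exact Or.inl ⟨by omega, hfeas⟩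
        · rw [hcx, show tot - w - v = tot - v - w by ring] at hfeas
          exact Or.inr ⟨by omega, hfeas⟩
    · rintro ⟨v, hv, hfeas⟩
      simp only [feasN, ← hw, Bool.or_eq_true, Bool.and_eq_true, decide_eq_true_eq] at hfeas
      rcases hfeas with ⟨hle, hf⟩ | ⟨hle, hf⟩
      · refine ⟨v - w, ?_, ?_⟩
        · rw [mem_innerfold]; exact Or.inr ⟨v, hv, Or.inl ⟨by omega, rfl⟩⟩
        · rw [show tot - w - (v - w) = tot - v by ring]; exact hf
      · refine ⟨v, ?_, ?_⟩
        · rw [mem_innerfold]; exact Or.inr ⟨v, hv, Or.inr ⟨by omega, rfl⟩⟩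
        · rw [show tot - w - v = tot - v - w by ring]; exact hf

theorem ferry_eq_feasN (A : List Int) (L i j k : Int) (f : List (List Int × Bool))
    (h : Pre_ferry A L i j k f) : ferry A L i j k f = feasN A i j k.toNat := by
  obtain ⟨hk0, hkl, hf⟩ := h
  have hinv : MemoOK A k (PySem.Dict.mk f) := by
    intro i' j' k' v hg h1 h2
    have hmem := PySem.Dict.mem_items_of_get?_eq_some (PySem.Dict.mk f) hg
    have hkey := hf _ hmem
    simp only [pvKeyUnreachable, decide_eq_true_eq] at hkey
    omega
  exact (ferryAux_correct A L (k.toNat + 1) i j k _ hk0 hkl (by omega) hinv).1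

theorem ferry_alt_eq_feasN (A : List Int) (L i j k : Int) (f : List (List Int × Bool))
    (hk0 : 0 ≤ k) : ferry_alt A L i j k f = feasN A i j k.toNat := by
  unfold ferry_alt
  by_cases h0 : k = 0
  · subst h0
    simp [feasN]
  · rw [if_neg h0]
    dsimp only
    have hkc : ((k.toNat : Nat) : Int) = k := Int.toNat_of_nonneg hk0
    have hiff := foldl_range_feas A k.toNat (i + j) (PySem.Set.ofList [i])
    rw [hkc] at hiff
    have hiff2 : ((PySem.List.pyRange k 0 (-1)).foldl (altStep A) (i + j, PySem.Set.ofList [i])).2 ≠ []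
        ↔ feasN A i j k.toNat = true := by
      rw [hiff]
      constructor
      · rintro ⟨v, hv, hfe⟩
        have hvi : v = i := by simpa [PySem.Set.ofList, PySem.Set.add] using hv
        rw [hvi, show i + j - i = j by ring] at hfe
        exact hfe
      · intro hfe
        refine ⟨i, by simp [PySem.Set.ofList, PySem.Set.add], ?_⟩
        rw [show i + j - i = j by ring]
        exact hfe
    cases hb : feasN A i j k.toNat
    · rw [hb] at hiff2
      have : ((PySem.List.pyRange k 0 (-1)).foldl (altStep A) (i + j, PySem.Set.ofList [i])).2 = [] := by
        by_contra hne
        exact absurd (hiff2.mp hne) (by simp)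
      simp [PySem.Set.len, this]
    · rw [hb] at hiff2
      have hne := hiff2.mpr rfl
      simp [PySem.Set.len, List.length_pos_iff, hne]

-- ===== VERDICT (by name: the statement is the Claim_ definition above) =====
theorem ferry_spec : Claim_equal_ferry := by
  intro A L i j k f _ hPre
  unfold Spec_ferry
  rw [ferry_eq_feasN A L i j k f hPre, ferry_alt_eq_feasN A L i j k f hPre.1]
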